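-- pv_equiv track=rewrite | github.com/eitatech/gatomia-vscode | .github/skills/gatomia/scripts/orchestrator.py | _extract_module_summary_from_content
-- ===== SOURCE A (Python) =====
-- def _extract_module_summary_from_content(content: str) -> str:
--     """Extract summary from documentation content."""
--     lines = content.split("\n")
--     in_overview = False
--     summary_lines = []
--
--     for line in lines:
--         if line.startswith("## Overview"):
--             in_overview = True
--             continue
--
--         if in_overview:
--             if line.startswith("#"):
--                 break
--             if line.strip():
--                 summary_lines.append(line.strip())
--                 if len(summary_lines) >= 2:
--                     break
--
--     return " ".join(summary_lines) if summary_lines else "Module documentation."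
-- ===== SOURCE B (Python) =====
-- def _extract_module_summary_from_content(content: str) -> str:
--     """Extract summary from documentation content."""
--     lines = content.split("\n")
--     try:
--         start = next(i for i, l in enumerate(lines) if l.startswith("## Overview")) + 1
--     except StopIteration:
--         return "Module documentation."
--     block = []
--     for l in lines[start:]:
--         if l.startswith("#"):
--             break
--         block.append(l)
--     picked = [l.strip() for l in block if l.strip()][:2]
--     return " ".join(picked) if picked else "Module documentation."
-- ===== Notes on version B (the rewrite author's own statement) =====
-- stated objective: alternative
-- what changed: Replaces A's single stateful scan (in_overview flag, break/continue, length check inside the loop) by a three-stage pipeline: locate the '## Overview' heading, take the contiguous block up to the next heading, then a strip/filter comprehension truncated to two lines; Pre_ excludes content with more than one '## Overview' heading, a malformed-document corner where A reads on past the repeated heading while B treats it as the next section, and either reading is defensible.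
-- outside the precondition, e.g. on _extract_module_summary_from_content('## Overview\n## Overview\nX'): A returns 'X', B returns 'Module documentation.'
import Mathlib
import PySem

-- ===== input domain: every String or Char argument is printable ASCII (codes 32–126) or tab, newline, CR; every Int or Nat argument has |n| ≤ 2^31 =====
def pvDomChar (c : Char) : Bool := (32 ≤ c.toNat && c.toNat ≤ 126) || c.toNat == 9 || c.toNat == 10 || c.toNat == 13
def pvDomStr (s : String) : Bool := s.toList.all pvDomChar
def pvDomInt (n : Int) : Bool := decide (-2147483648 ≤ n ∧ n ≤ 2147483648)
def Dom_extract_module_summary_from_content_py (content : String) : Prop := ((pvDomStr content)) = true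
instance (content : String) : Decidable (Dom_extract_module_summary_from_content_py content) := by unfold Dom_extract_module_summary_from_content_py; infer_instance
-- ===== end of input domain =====

-- B replaces A's single stateful scan by a locate-heading / take-block / filter pipeline (alternative decomposition, same cost).

-- ===== PORT A =====
-- the for-loop of A, with its break/continue structure: state = (in_overview, summary_lines)
def pvLoopA : List String → Bool → List String → List String
  | [], _, acc => acc
  | l :: rest, inov, acc =>
    if PySem.Str.startswith l "## Overview" then pvLoopA rest true acc
    else if inov then
      if PySem.Str.startswith l "#" then acc
      else if PySem.Str.strip l ≠ "" then
        let acc' := acc ++ [PySem.Str.strip l]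
        if 2 ≤ acc'.length then acc' else pvLoopA rest inov acc'
      else pvLoopA rest inov acc
    else pvLoopA rest inov acc

def extract_module_summary_from_content_py (content : String) : String :=
  let lines := (PySem.Str.split? content "\n").getD []
  let s := pvLoopA lines false []
  if s ≠ [] then PySem.Str.join " " s else "Module documentation."

-- ===== PORT B =====
-- next(i for i, l in enumerate(lines) if l.startswith("## Overview")) + 1, StopIteration -> none
def pvFindStart : List String → Option Nat
  | [] => none
  | l :: rest =>
    if PySem.Str.startswith l "## Overview" then some 1
    else (pvFindStart rest).map (· + 1)

-- the block loop of Source B: append until a heading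
def pvBlock : List String → List String
  | [] => []
  | l :: rest =>
    if PySem.Str.startswith l "#" then []
    else l :: pvBlock rest

def extract_module_summary_from_content_py_alt (content : String) : String :=
  let lines := (PySem.Str.split? content "\n").getD []
  match pvFindStart lines with
  | none => "Module documentation."
  | some start =>
    let block := pvBlock (lines.drop start)
    let picked := ((block.filter (fun l => !(PySem.Str.strip l == ""))).map PySem.Str.strip).take 2
    if picked ≠ [] then PySem.Str.join " " picked else "Module documentation."

-- ===== PRECONDITION & SPEC =====
-- Pre_ excludes content with more than one line starting with '## Overview' (on which A still returns a
-- value): a malformed document with a repeated Overview heading; A reads on past the repeated heading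
-- while B treats it as the start of the next section, and either reading of such input is defensible.
def Pre_extract_module_summary_from_content_py (content : String) : Prop :=
  (((PySem.Str.split? content "\n").getD []).countP
      (fun l => PySem.Str.startswith l "## Overview")) ≤ 1
instance (content : String) : Decidable (Pre_extract_module_summary_from_content_py content) := by
  unfold Pre_extract_module_summary_from_content_py; infer_instance

def pvWitness_extract_module_summary_from_content_py : String := "## Overview\nHi"

def Spec_extract_module_summary_from_content_py (content : String) (out : String) : Prop := out = extract_module_summary_from_content_py_alt content
instance (content : String) (out : String) : Decidable (Spec_extract_module_summary_from_content_py content out) := by unfold Spec_extract_module_summary_from_content_py; infer_instance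

-- ===== CLAIM (what is proved, stated in full; the proofs are below) =====
def Claim_equal_extract_module_summary_from_content_py : Prop := ∀ (content : String), Dom_extract_module_summary_from_content_py content → Pre_extract_module_summary_from_content_py content → Spec_extract_module_summary_from_content_py content (extract_module_summary_from_content_py content)

-- ===== LEMMAS AND PROOFS =====

-- abbreviation used only in proofs: B's filtered, stripped block (before the .take 2)
def pvPicked (ls : List String) : List String :=
  ((pvBlock ls).filter (fun l => !(PySem.Str.strip l == ""))).map PySem.Str.strip

-- once in the Overview phase and with no further '## Overview' heading, A's loop collects
-- exactly B's picked block, truncated to two lines total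
theorem pv_ov_phase (ls : List String)
    (hno : ∀ l ∈ ls, PySem.Str.startswith l "## Overview" = false) :
    ∀ acc : List String, acc.length ≤ 1 →
      pvLoopA ls true acc = acc ++ (pvPicked ls).take (2 - acc.length) := by
  induction ls with
  | nil => intro acc _; simp [pvLoopA, pvPicked, pvBlock]
  | cons l rest ih =>
    intro acc hacc
    have hov : PySem.Str.startswith l "## Overview" = false := hno l (by simp)
    have hno' : ∀ l ∈ rest, PySem.Str.startswith l "## Overview" = false :=
      fun x hx => hno x (by simp [hx])
    have ih' := ih hno'
    cases hh : PySem.Str.startswith l "#" with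
    | true =>
      simp at hov hh
      simp [pvLoopA, pvPicked, pvBlock, hov, hh]
    | false =>
      by_cases hs : PySem.Str.strip l = ""
      · simp at hov hh
        simp [pvLoopA, pvPicked, pvBlock, hov, hh, hs, ih' acc hacc]
      · simp at hov hh
        have hpicked : pvPicked (l :: rest) = PySem.Str.strip l :: pvPicked rest := by
          simp [pvPicked, pvBlock, hov, hh, hs]
        rcases Nat.lt_or_ge acc.length 1 with h0 | h1
        · have hnil : acc = [] := by
            cases acc with
            | nil => rfl
            | cons a t => simp at h0
          subst hnil
          have hih := ih' [PySem.Str.strip l] (by simp)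
          simp [pvLoopA, hov, hh, hs, hpicked, hih]
        · have h1' : acc.length = 1 := by omega
          have h2 : 2 ≤ (acc ++ [PySem.Str.strip l]).length := by simp [h1']
          simp [pvLoopA, hov, hh, hs, hpicked, h1']

theorem pv_core (ls : List String)
    (hpre : ls.countP (fun l => PySem.Str.startswith l "## Overview") ≤ 1) :
    (if pvLoopA ls false [] ≠ [] then PySem.Str.join " " (pvLoopA ls false [])
     else "Module documentation.")
    = (match pvFindStart ls with
       | none => "Module documentation."
       | some start =>
         let picked := (pvPicked (ls.drop start)).take 2
         if picked ≠ [] then PySem.Str.join " " picked else "Module documentation.") := by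
  induction ls with
  | nil => simp [pvLoopA, pvFindStart]
  | cons l rest ih =>
    cases hov : PySem.Str.startswith l "## Overview" with
    | true =>
      have hcnt : rest.countP (fun l => PySem.Str.startswith l "## Overview") = 0 := by
        rw [List.countP_cons, hov, if_pos rfl] at hpre
        omega
      have hno : ∀ x ∈ rest, PySem.Str.startswith x "## Overview" = false := by
        intro x hx
        by_contra hc
        have : 0 < rest.countP (fun l => PySem.Str.startswith l "## Overview") := by
          rw [List.countP_pos_iff]
          exact ⟨x, hx, by simpa using hc⟩
        omega
      have hov' := hov; simp at hov'
      have h1 : pvLoopA (l :: rest) false [] = pvLoopA rest true [] := by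
        simp [pvLoopA, hov']
      have h2 := pv_ov_phase rest hno [] (by simp)
      simp only [h1, h2, List.nil_append]
      simp [pvFindStart, hov']
    | false =>
      have hpre' : rest.countP (fun l => PySem.Str.startswith l "## Overview") ≤ 1 := by
        rw [List.countP_cons, hov, if_neg (by simp)] at hpre
        omega
      have hov' := hov; simp at hov'
      have h1 : pvLoopA (l :: rest) false [] = pvLoopA rest false [] := by
        simp [pvLoopA, hov']
      rw [h1, ih hpre']
      cases hfs : pvFindStart rest with
      | none => simp [pvFindStart, hov', hfs]
      | some i => simp [pvFindStart, hov', hfs, List.drop_succ_cons]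

-- ===== VERDICT (by name: the statement is the Claim_ definition above) =====
theorem extract_module_summary_from_content_py_spec : Claim_equal_extract_module_summary_from_content_py := by
  intro content _ hpre
  show extract_module_summary_from_content_py content = extract_module_summary_from_content_py_alt content
  unfold extract_module_summary_from_content_py extract_module_summary_from_content_py_alt
  have := pv_core ((PySem.Str.split? content "\n").getD []) hpre
  simp only [pvPicked] at this
  simpa using this
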